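-- pv_equiv track=rewrite | github.com/Aviatore-bioinformatics/annotator | lib/Helpers.py | rev_check
-- ===== SOURCE A (Python) =====
-- def rev_check(collection, val, min_value):
--     collection_copy = collection.copy()
--     for i in range(1, len(collection_copy) + 1):
--         if len(collection_copy) == 1:
--             if collection_copy[0] - val >= min_value:
--                 collection_copy[0] -= val
--                 return collection_copy
--             return []
--
--         if collection_copy[-i] - val >= 0:
--             collection_copy[-i] -= val
--         else:
--             return []
--
--     return collection_copy
-- ===== SOURCE B (Python) =====
-- def rev_check(collection, val, min_value):
--     threshold = min_value if len(collection) == 1 else 0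
--     def go(xs):
--         # divide and conquer: subtracted sublist, or None if some element drops below threshold
--         if not xs:
--             return []
--         if len(xs) == 1:
--             y = xs[0] - val
--             return [y] if y >= threshold else None
--         left = go(xs[:len(xs) // 2])
--         if left is None:
--             return None
--         right = go(xs[len(xs) // 2:])
--         return None if right is None else left + right
--     r = go(collection)
--     return [] if r is None else r
-- ===== Notes on version B (the rewrite author's own statement) =====
-- stated objective: alternative
-- what changed: Replaces A's back-to-front in-place mutating loop (with the len==1 check re-tested inside the loop) by a divide-and-conquer recursion with an Option-style failure value: the threshold (min_value for a singleton, 0 otherwise) is fixed once, the list is split in halves, each half is validated-and-subtracted recursively, and the results are concatenated, with None propagating failure.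
import Mathlib
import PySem

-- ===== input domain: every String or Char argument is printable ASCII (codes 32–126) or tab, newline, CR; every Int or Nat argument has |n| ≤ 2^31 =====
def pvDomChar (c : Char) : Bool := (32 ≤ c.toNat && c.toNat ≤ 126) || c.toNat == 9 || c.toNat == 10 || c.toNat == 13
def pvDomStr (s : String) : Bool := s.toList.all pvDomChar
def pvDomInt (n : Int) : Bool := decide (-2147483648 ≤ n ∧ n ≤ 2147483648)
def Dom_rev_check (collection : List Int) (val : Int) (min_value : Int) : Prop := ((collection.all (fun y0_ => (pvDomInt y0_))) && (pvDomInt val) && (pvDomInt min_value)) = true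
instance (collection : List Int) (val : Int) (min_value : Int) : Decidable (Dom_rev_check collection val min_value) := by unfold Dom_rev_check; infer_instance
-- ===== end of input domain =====

-- B replaces A's back-to-front in-place mutating loop by a divide-and-conquer recursion with Option failure and a once-fixed threshold; same values everywhere.

-- ===== PORT A =====
-- the for-loop over i in range(1, len+1), carried as the list of remaining i's;
-- `cur` is collection_copy. Python's cur[-i] with 1 ≤ i ≤ len(cur) is element cur.length - i: exact here.
def revLoopA (val min_value : Int) : List Int → List Nat → List Int
  | cur, [] => cur
  | cur, i :: rest =>
      if cur.length == 1 then
        if min_value ≤ cur.getD 0 0 - val then cur.set 0 (cur.getD 0 0 - val)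
        else []
      else
        let idx := cur.length - i
        if 0 ≤ cur.getD idx 0 - val then revLoopA val min_value (cur.set idx (cur.getD idx 0 - val)) rest
        else []

def rev_check (collection : List Int) (val : Int) (min_value : Int) : List Int :=
  -- range(1, len+1) as a Nat list
  revLoopA val min_value collection ((List.range collection.length).map (· + 1))

-- ===== PORT B =====
-- the inner recursive helper `go` from Source B: divide and conquer; subtracted sublist, or none on a failing element
def revGoB (val threshold : Int) (xs : List Int) : Option (List Int) :=
  if xs.length = 0 then some []
  else if xs.length = 1 then
    if xs.getD 0 0 - val ≥ threshold then some [xs.getD 0 0 - val] else none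
  else
    match revGoB val threshold (xs.take (xs.length / 2)) with
    | none => none
    | some left =>
        match revGoB val threshold (xs.drop (xs.length / 2)) with
        | none => none
        | some right => some (left ++ right)
termination_by xs.length
decreasing_by
  · simp; omega
  · simp; omega

def rev_check_alt (collection : List Int) (val : Int) (min_value : Int) : List Int :=
  let threshold := if collection.length == 1 then min_value else 0
  match revGoB val threshold collection with
  | none => []
  | some r => r

-- ===== PRECONDITION & SPEC =====
def Spec_rev_check (collection : List Int) (val : Int) (min_value : Int) (out : List Int) : Prop := out = rev_check_alt collection val min_value
instance (collection : List Int) (val : Int) (min_value : Int) (out : List Int) : Decidable (Spec_rev_check collection val min_value out) := by unfold Spec_rev_check; infer_instance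

-- ===== CLAIM (what is proved, stated in full; the proofs are below) =====
def Claim_equal_rev_check : Prop := ∀ (collection : List Int) (val : Int) (min_value : Int), Dom_rev_check collection val min_value → Spec_rev_check collection val min_value (rev_check collection val min_value)

-- ===== LEMMAS AND PROOFS =====

theorem pv_getD_mid (x d : Int) : ∀ (pre suf : List Int), (pre ++ x :: suf).getD pre.length d = x := by
  intro pre suf
  induction pre with
  | nil => rfl
  | cons a t _ => simp

theorem pv_set_mid (x y : Int) : ∀ (pre suf : List Int), (pre ++ x :: suf).set pre.length y = pre ++ y :: suf := by
  intro pre suf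
  induction pre with
  | nil => rfl
  | cons a t ih => simp [ih]

-- characterisation of B's recursion: it succeeds iff every element clears the threshold
theorem revGoB_spec_aux (val threshold : Int) : ∀ (n : Nat) (xs : List Int), xs.length ≤ n →
    revGoB val threshold xs =
      if xs.all (fun x => decide (threshold ≤ x - val)) then some (xs.map (· - val)) else none := by
  intro n
  induction n with
  | zero =>
      intro xs hxs
      have : xs = [] := List.length_eq_zero_iff.mp (Nat.le_zero.mp hxs)
      subst this
      rw [revGoB.eq_def]
      simp
  | succ n ih =>
      intro xs hxs
      rw [revGoB.eq_def]
      by_cases h0 : xs.length = 0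
      · have : xs = [] := List.length_eq_zero_iff.mp h0
        subst this; simp
      · rw [if_neg h0]
        by_cases h1 : xs.length = 1
        · rw [if_pos h1]
          match xs, h1 with
          | [x], _ =>
              by_cases hx : threshold ≤ x - val
              · simp [hx, ge_iff_le]
              · simp [hx, ge_iff_le]
        · rw [if_neg h1]
          have hlen2 : 2 ≤ xs.length := by omega
          have htk : (xs.take (xs.length / 2)).length ≤ n := by
            rw [List.length_take]; omega
          have hdr : (xs.drop (xs.length / 2)).length ≤ n := by
            rw [List.length_drop]; omega
          rw [ih _ htk, ih _ hdr]
          conv_rhs => rw [← List.take_append_drop (xs.length / 2) xs]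
          rw [List.all_append, List.map_append]
          by_cases ht : (xs.take (xs.length / 2)).all (fun x => decide (threshold ≤ x - val)) = true
          · simp only [ht, if_true, Bool.true_and]
            by_cases hd : (xs.drop (xs.length / 2)).all (fun x => decide (threshold ≤ x - val)) = true
            · simp only [hd, if_true]
            · simp only [Bool.not_eq_true] at hd
              simp [hd]
          · simp only [Bool.not_eq_true] at ht
            simp [ht]

theorem revGoB_spec (val threshold : Int) (xs : List Int) :
    revGoB val threshold xs =
      if xs.all (fun x => decide (threshold ≤ x - val)) then some (xs.map (· - val)) else none :=
  revGoB_spec_aux val threshold xs.length xs (Nat.le_refl _)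

-- loop invariant for A: with `suf` the already-processed tail and `pre` the untouched prefix,
-- the remaining iterations validate-and-subtract over `pre` back to front.
theorem revLoopA_spec (val min_value : Int) (pre : List Int) : ∀ (suf : List Int),
    (pre ++ suf).length ≠ 1 →
    revLoopA val min_value (pre ++ suf) ((List.range pre.length).map (· + suf.length + 1)) =
      if pre.all (fun x => decide (0 ≤ x - val)) then pre.map (· - val) ++ suf else [] := by
  induction pre using List.reverseRecOn with
  | nil => intro suf _; simp [revLoopA]
  | append_singleton pre' x ih =>
      intro suf hlen
      have hrange : (List.range (pre' ++ [x]).length).map (· + suf.length + 1)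
          = (suf.length + 1) :: (List.range pre'.length).map (· + (x :: suf).length + 1) := by
        simp [List.range_succ_eq_map, List.map_map, Function.comp, Nat.add_comm, Nat.add_assoc,
          Nat.add_left_comm]
      have hassoc : pre' ++ [x] ++ suf = pre' ++ x :: suf := by simp
      rw [hrange, hassoc]
      have hne : ((pre' ++ x :: suf).length == 1) = false := by
        rw [List.length_append, List.length_cons]
        simp only [beq_eq_false_iff_ne]
        simp at hlen
        omega
      have hidx : (pre' ++ x :: suf).length - (suf.length + 1) = pre'.length := by
        rw [List.length_append, List.length_cons]; omega
      simp only [revLoopA, hne, Bool.false_eq_true, if_false, hidx, pv_getD_mid, pv_set_mid]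
      by_cases hx : 0 ≤ x - val
      · rw [if_pos hx]
        have h2 : (pre' ++ (x - val) :: suf).length ≠ 1 := by
          rw [List.length_append, List.length_cons]
          simp at hlen
          omega
        have hIH := ih ((x - val) :: suf) h2
        simp only [List.length_cons] at hIH ⊢
        rw [hIH]
        have hcond : ((pre' ++ [x]).all (fun y => decide (0 ≤ y - val)))
            = (pre'.all (fun y => decide (0 ≤ y - val))) := by
          simp [List.all_append]
          intro _
          omega
        have hmap : List.map (· - val) (pre' ++ [x]) ++ suf
            = List.map (· - val) pre' ++ (x - val) :: suf := by simp
        rw [hcond, hmap]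
      · rw [if_neg hx]
        have hfx : ((pre' ++ [x]).all (fun y => decide (0 ≤ y - val))) = false := by
          simp [List.all_append]
          intro _
          omega
        rw [hfx]
        simp

-- ===== VERDICT (by name: the statement is the Claim_ definition above) =====
theorem rev_check_spec : Claim_equal_rev_check := by
  intro collection val min_value _
  unfold Spec_rev_check rev_check rev_check_alt
  match collection with
  | [] => simp [revLoopA, revGoB_spec]
  | [x] =>
      simp only [revLoopA, List.length_cons, List.length_nil, List.range_succ, List.range_zero,
        List.map, List.nil_append, revGoB_spec]
      by_cases h : min_value ≤ x - val
      · simp [h, List.set]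
      · simp [h]
  | a :: b :: t =>
      have hlen : ((a :: b :: t) ++ ([] : List Int)).length ≠ 1 := by simp
      have hA := revLoopA_spec val min_value (a :: b :: t) [] hlen
      simp only [List.append_nil, List.length_nil] at hA
      rw [hA]
      have hne : ((a :: b :: t).length == 1) = false := by simp
      rw [hne]
      simp only [Bool.false_eq_true, if_false, revGoB_spec]
      by_cases hall : ((a :: b :: t).all fun x => decide (0 ≤ x - val)) = true
      · simp only [hall, if_true]
      · simp only [Bool.not_eq_true] at hall
        simp only [hall, Bool.false_eq_true, if_false]
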